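-- pv_equiv track=rewrite | github.com/pietroferretti/ctf | csawfinals2017/ecxor/xortools3.py | columnify
-- ===== SOURCE A (Python) =====
-- import itertools
--
-- def blockify(text, blocklen):
--     '''Splits the text as a list of blocklen-long strings'''
--     return [text[i:i+blocklen] for i in range(0, len(text), blocklen)]
--
-- def columnify(ciphertext, keylen, fill=False):
--     '''Takes the ciphertext and collects the characters corresponding to each key position.
--
--     Arguments:
--         ciphertext -- the ciphertext as a string
--         keylen     -- the length of the xor key
--         fill       -- if True all the lists of characters will
--                       be filled with None to have the same length (default False)
--
--     Returns a list of lists of characters.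
--     '''
--
--     # split ciphertext in blocks
--     blocks = blockify(ciphertext, keylen)
--
--     # build list of lists
--     result = [list(tup) for tup in itertools.zip_longest(*blocks)]
--
--     # remove Nones
--     if not fill:
--         for l in result:
--             if None in l:
--                 l.remove(None)    # at most one None
--
--     return result
-- ===== SOURCE B (Python) =====
-- def columnify(ciphertext, keylen, fill=False):
--     '''Collect ciphertext characters by key position, reading each column
--     directly by stride instead of blockifying and zipping.'''
--     n = len(ciphertext)
--     r = min(keylen, n)
--     cols = [[ciphertext[i] for i in range(j, n, keylen)] for j in range(r)]
--     if fill and cols: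
--         nblocks = (n + keylen - 1) // keylen
--         for col in cols:
--             if len(col) < nblocks:
--                 col.append(None)
--     return cols
-- ===== Notes on version B (the rewrite author's own statement) =====
-- stated objective: idiomatic
-- what changed: B reads each column directly by stride (ciphertext[j], ciphertext[j+keylen], ... for each key position j) instead of A's chunking into keylen-blocks and transposing them with itertools.zip_longest followed by None-removal.
-- crash fix: On keylen == 0 A raises ValueError (range() with zero step) while B naturally returns []. — e.g. on columnify("ab", 0, false): A raises ValueError, B returns []
import Mathlib
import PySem

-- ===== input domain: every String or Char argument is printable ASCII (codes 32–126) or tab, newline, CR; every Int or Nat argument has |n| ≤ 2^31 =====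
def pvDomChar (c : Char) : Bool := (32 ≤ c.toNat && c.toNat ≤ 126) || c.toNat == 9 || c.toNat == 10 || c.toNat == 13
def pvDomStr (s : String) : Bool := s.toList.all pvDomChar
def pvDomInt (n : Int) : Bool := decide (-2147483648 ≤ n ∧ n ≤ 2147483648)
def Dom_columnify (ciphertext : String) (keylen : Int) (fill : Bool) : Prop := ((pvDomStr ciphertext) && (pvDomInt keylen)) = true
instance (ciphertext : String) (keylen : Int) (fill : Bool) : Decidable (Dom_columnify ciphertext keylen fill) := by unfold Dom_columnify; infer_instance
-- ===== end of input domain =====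

-- B groups ciphertext characters by key position by reading each column directly by stride,
-- instead of A's blockify / zip_longest / remove-None pipeline (equivalence of return values; same cost).


-- ===== PORT A =====
-- blockify: [text[i:i+blocklen] for i in range(0, len(text), blocklen)]
def pvBlockify (text : String) (blocklen : Int) : List String :=
  (PySem.List.pyRange 0 (PySem.Str.len text) blocklen).map
    (fun i => PySem.Str.slice text (some i) (some (i + blocklen)))

def columnify (ciphertext : String) (keylen : Int) (fill : Bool) : List (List (Option String)) :=
  let blocks := pvBlockify ciphertext keylen
  -- itertools.zip_longest(*blocks), ported by hand: max-of-lengths rows; entry i of a row is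
  -- block[i] (a one-char string) or None past that block's end
  let rows := blocks.map String.toList
  let maxLen := rows.foldl (fun m row => max m row.length) 0
  let result := (List.range maxLen).map (fun i =>
    rows.map (fun row => row[i]?.map (fun c => String.mk [c])))
  if fill then result
  else
    -- for l in result: if None in l: l.remove(None)
    result.map (fun l => if none ∈ l then (PySem.List.remove? l none).getD l else l)

-- ===== PORT B =====
def columnify_alt (ciphertext : String) (keylen : Int) (fill : Bool) : List (List (Option String)) :=
  let l := ciphertext.toList
  let n : Int := l.length
  let r := min keylen n
  -- [[ciphertext[i] for i in range(j, n, keylen)] for j in range(r)]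
  -- ciphertext[i] is ported as pyGet? (the index is always in range here); the one-char
  -- string lands in the Option the result type already carries
  let cols := (PySem.List.pyRange 0 r 1).map (fun j =>
    (PySem.List.pyRange j n keylen).map (fun i =>
      (PySem.List.pyGet? l i).map (fun c => String.mk [c])))
  if fill && !cols.isEmpty then
    let nblocks := PySem.Int.floordiv (n + keylen - 1) keylen
    cols.map (fun col => if (col.length : Int) < nblocks then col ++ [none] else col)
  else
    cols

-- ===== PRECONDITION & SPEC =====
-- Pre_ excludes exactly keylen == 0, where A raises ValueError (range() with zero step).
def Pre_columnify (ciphertext : String) (keylen : Int) (fill : Bool) : Prop := keylen ≠ 0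
instance (ciphertext : String) (keylen : Int) (fill : Bool) : Decidable (Pre_columnify ciphertext keylen fill) := by unfold Pre_columnify; infer_instance
def pvWitness_columnify : String × Int × Bool := ("abcde", 2, false)

-- On keylen == 0 A raises ValueError (range() with zero step) while B naturally returns [].
def Raises_columnify (ciphertext : String) (keylen : Int) (fill : Bool) : Prop := keylen = 0
instance (ciphertext : String) (keylen : Int) (fill : Bool) : Decidable (Raises_columnify ciphertext keylen fill) := by unfold Raises_columnify; infer_instance
def pvRaiseWitness_columnify : String × Int × Bool := ("ab", 0, false)
def pvRaiseWitnessOut_columnify : List (List (Option String)) := []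

def Spec_columnify (ciphertext : String) (keylen : Int) (fill : Bool) (out : List (List (Option String))) : Prop := out = columnify_alt ciphertext keylen fill
instance (ciphertext : String) (keylen : Int) (fill : Bool) (out : List (List (Option String))) : Decidable (Spec_columnify ciphertext keylen fill out) := by unfold Spec_columnify; infer_instance

-- ===== CLAIM (what is proved, stated in full; the proofs are below) =====
def Claim_equal_columnify : Prop := ∀ (ciphertext : String) (keylen : Int) (fill : Bool), Dom_columnify ciphertext keylen fill → Pre_columnify ciphertext keylen fill → Spec_columnify ciphertext keylen fill (columnify ciphertext keylen fill)
def Claim_raises_columnify : Prop := (∀ (ciphertext : String) (keylen : Int) (fill : Bool), Dom_columnify ciphertext keylen fill → Raises_columnify ciphertext keylen fill → ¬ Pre_columnify ciphertext keylen fill) ∧ (Dom_columnify (pvRaiseWitness_columnify.1) (pvRaiseWitness_columnify.2.1) (pvRaiseWitness_columnify.2.2) ∧ Raises_columnify (pvRaiseWitness_columnify.1) (pvRaiseWitness_columnify.2.1) (pvRaiseWitness_columnify.2.2) ∧ columnify_alt (pvRaiseWitness_columnify.1) (pvRaiseWitness_columnify.2.1) (pvRaiseWitness_columnify.2.2) =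 pvRaiseWitnessOut_columnify)

-- ===== LEMMAS AND PROOFS =====

-- ceil-division ranges with a positive stride, in Nat terms
theorem pv_pyRange_stride (a n k' : ℕ) (hk : 0 < k') :
    PySem.List.pyRange (a:Int) (n:Int) (k':Int) =
      (List.range ((n - a + k' - 1)/k')).map (fun t => ((a + k'*t : ℕ) : Int)) := by
  rw [PySem.List.pyRange_of_pos _ _ (by exact_mod_cast hk)]
  have hcount : (if (a:Int) < (n:Int) then (((n:Int) - a + (k':Int) - 1) / k').toNat else 0)
      = (n - a + k' - 1)/k' := by
    split_ifs with h
    · have ha : a < n := by exact_mod_cast h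
      have h1 : ((n:Int) - a + (k':Int) - 1) = ((n - a + k' - 1 : ℕ) : Int) := by push_cast; omega
      rw [h1]; norm_cast
    · have ha : n ≤ a := by omega
      have h2 : n - a + k' - 1 = k' - 1 := by omega
      rw [h2, Nat.div_eq_of_lt (by omega)]
  rw [hcount]
  exact List.map_congr_left (fun t _ => by push_cast; ring)

theorem pv_ceil_lt_iff (x k' t : ℕ) (hk : 0 < k') : t < (x + k' - 1)/k' ↔ k'*t < x := by
  rw [Nat.lt_iff_add_one_le, Nat.le_div_iff_mul_le hk]
  have h : (t+1)*k' = k'*t + k' := by ring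
  omega

theorem pv_foldl_max_le {α : Type} (g : α → ℕ) (c : ℕ) :
    ∀ (xs : List α) (a), a ≤ c → (∀ b ∈ xs, g b ≤ c) →
      xs.foldl (fun acc x => max acc (g x)) a ≤ c := by
  intro xs
  induction xs with
  | nil => intro a ha _; simpa
  | cons x xs ih =>
    intro a ha hb
    exact ih _ (max_le ha (hb x (by simp))) (fun b h => hb b (by simp [h]))

theorem pv_init_le_foldl_max {α : Type} (g : α → ℕ) :
    ∀ (xs : List α) (a), a ≤ xs.foldl (fun acc x => max acc (g x)) a := by
  intro xs
  induction xs with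
  | nil => intro a; simp
  | cons x xs ih => intro a; exact le_trans (le_max_left a (g x)) (ih (max a (g x)))

theorem pv_le_foldl_max {α : Type} (g : α → ℕ) (b : α) :
    ∀ (xs : List α) (a), b ∈ xs → g b ≤ xs.foldl (fun acc x => max acc (g x)) a := by
  intro xs
  induction xs with
  | nil => intro a h; simp at h
  | cons x xs ih =>
    intro a h
    rcases List.mem_cons.1 h with rfl | h
    · exact le_trans (le_max_right a (g b)) (pv_init_le_foldl_max g xs (max a (g b)))
    · exact ih _ h

theorem pv_remove_last_none (xs : List (Option String)) (hv : (none : Option String) ∉ xs) :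
    PySem.List.remove? (xs ++ [none]) none = some xs := by
  induction xs with
  | nil => simp [PySem.List.remove?, List.idxOf?, List.findIdx?_cons]
  | cons a xs ih =>
    have ha : ¬ a.isNone := by cases a <;> simp_all
    simp only [PySem.List.remove?, List.idxOf?] at ih ⊢
    simp only [List.cons_append, List.findIdx?_cons]
    cases a <;> simp_all

-- A's result in closed form (positive stride)
theorem pv_A_normal (s : String) (k' : ℕ) (fill : Bool) (hk' : 0 < k') :
    columnify s (k':Int) fill =
      (fun res => if fill then res
        else res.map (fun col => if none ∈ col then (PySem.List.remove? col none).getD col else col))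
      ((List.range (min k' s.toList.length)).map (fun j =>
        (List.range ((s.toList.length + k' - 1)/k')).map (fun t =>
          (s.toList[k'*t + j]?).map (fun c => String.mk [c])))) := by
  set l := s.toList with hl
  set n := l.length with hn
  set m := (n + k' - 1)/k' with hm
  have hlen : PySem.Str.len s = (n : Int) := by simp [PySem.Str.len, hn, hl]
  have hrows : (pvBlockify s (k':Int)).map String.toList
      = (List.range m).map (fun t => (l.drop (k'*t)).take k') := by
    simp only [pvBlockify, hlen]
    have h0 : (0:Int) = ((0:ℕ) : Int) := rfl
    rw [h0, pv_pyRange_stride 0 n k' hk']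
    rw [List.map_map, List.map_map]
    apply List.map_congr_left; intro t _
    simp only [Function.comp]
    rw [PySem.Str.toList_slice]
    show PySem.List.slice l _ _ = _
    have h1 : ((0 + k'*t : ℕ) : Int) + (k' : Int) = ((0 + k'*t + k' : ℕ) : Int) := by push_cast; ring
    rw [h1, PySem.List.slice_natCast]
    congr 1
    · omega
    · congr 1; omega
  have hmax : ((List.range m).map (fun t => (l.drop (k'*t)).take k')).foldl
      (fun acc row => max acc row.length) 0 = min k' n := by
    rw [List.foldl_map]
    rcases Nat.eq_zero_or_pos n with h0 | hpos
    · have hm0 : m = 0 := by rw [hm, h0]; exact Nat.div_eq_of_lt (by omega)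
      simp [hm0, h0]
    · apply le_antisymm
      · apply pv_foldl_max_le (fun t => ((l.drop (k'*t)).take k').length)
        · omega
        · intro b _
          simp only [List.length_take, List.length_drop]
          omega
      · have h0m : 0 ∈ List.range m := by
          rw [List.mem_range, hm]
          exact (pv_ceil_lt_iff n k' 0 hk').mpr (by omega)
        have := pv_le_foldl_max (fun t => ((l.drop (k'*t)).take k').length) 0 (List.range m) 0 h0m
        simpa using this
  -- assemble
  show (let blocks := pvBlockify s (k':Int)
        let rows := blocks.map String.toList
        let maxLen := rows.foldl (fun m row => max m row.length) 0
        let result := (List.range maxLen).map (fun i =>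
          rows.map (fun row => row[i]?.map (fun c => String.mk [c])))
        if fill then result
        else result.map (fun l => if none ∈ l then (PySem.List.remove? l none).getD l else l)) = _
  simp only [hrows, hmax]
  have hresult : ∀ i < min k' n,
      (List.range m).map ((fun row => row[i]?.map (fun c => String.mk [c])) ∘
        (fun t => (l.drop (k'*t)).take k'))
      = (List.range m).map (fun t => (l[k'*t + i]?).map (fun c => String.mk [c])) := by
    intro i hi
    apply List.map_congr_left; intro t _
    simp only [Function.comp, List.getElem?_take, List.getElem?_drop]
    rw [if_pos (by omega)]
  have hres2 : (List.range (min k' n)).map (fun i =>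
      ((List.range m).map (fun t => (l.drop (k'*t)).take k')).map
        (fun row => row[i]?.map (fun c => String.mk [c])))
      = (List.range (min k' n)).map (fun j =>
        (List.range m).map (fun t => (l[k'*t + j]?).map (fun c => String.mk [c]))) :=
    List.map_congr_left (fun i hi => by
      rw [List.map_map]; exact hresult i (List.mem_range.1 hi))
  rw [hres2]

-- B's result in closed form (positive stride)
theorem pv_B_normal (s : String) (k' : ℕ) (fill : Bool) (hk' : 0 < k') :
    columnify_alt s (k':Int) fill =
      (fun cols => if fill && !(cols.isEmpty) then
          cols.map (fun col =>
            if (col.length : Int) < (((s.toList.length + k' - 1)/k' : ℕ) : Int)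
            then col ++ [none] else col)
        else cols)
      ((List.range (min k' s.toList.length)).map (fun j =>
        (List.range ((s.toList.length - j + k' - 1)/k')).map (fun t =>
          (s.toList[j + k'*t]?).map (fun c => String.mk [c])))) := by
  set l := s.toList with hl
  set n := l.length with hn
  have hr : min (k':Int) ((n:ℕ):Int) = ((min k' n : ℕ) : Int) := by push_cast; rfl
  have hcols : (PySem.List.pyRange 0 (min (k':Int) ((n:ℕ):Int)) 1).map (fun j =>
        (PySem.List.pyRange j (n:Int) (k':Int)).map (fun i =>
          (PySem.List.pyGet? l i).map (fun c => String.mk [c])))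
      = (List.range (min k' n)).map (fun j =>
        (List.range ((n - j + k' - 1)/k')).map (fun t =>
          (l[j + k'*t]?).map (fun c => String.mk [c]))) := by
    rw [hr, PySem.List.pyRange_one, List.map_map]
    have hlen : (((min k' n : ℕ):Int) - 0).toNat = min k' n := by omega
    rw [hlen]
    apply List.map_congr_left; intro j _
    simp only [Function.comp, zero_add]
    rw [pv_pyRange_stride j n k' hk', List.map_map]
    apply List.map_congr_left; intro t _
    simp only [Function.comp, PySem.List.pyGet?_natCast]
  have hnb : PySem.Int.floordiv (((n:ℕ):Int) + (k':Int) - 1) (k':Int)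
      = (((n + k' - 1)/k' : ℕ) : Int) := by
    unfold PySem.Int.floordiv
    rw [Int.fdiv_eq_ediv]
    have h1 : ((n:ℕ):Int) + (k':Int) - 1 = ((n + k' - 1 : ℕ) : Int) := by push_cast; omega
    rw [h1]
    have h2 : ((0:Int) ≤ (k':Int) ∨ ((k':Int) ∣ ((n + k' - 1 : ℕ):Int))) := Or.inl (by positivity)
    rw [if_pos h2]
    exact (by push_cast; ring :
      (((n + k' - 1)/k' : ℕ) : Int) = ((n + k' - 1 : ℕ):Int) / (k':Int)).symm
  show (let l' := s.toList
        let nn : Int := l'.length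
        let r := min (k':Int) nn
        let cols := (PySem.List.pyRange 0 r 1).map (fun j =>
          (PySem.List.pyRange j nn (k':Int)).map (fun i =>
            (PySem.List.pyGet? l' i).map (fun c => String.mk [c])))
        if fill && !cols.isEmpty then
          let nblocks := PySem.Int.floordiv (nn + (k':Int) - 1) (k':Int)
          cols.map (fun col => if (col.length : Int) < nblocks then col ++ [none] else col)
        else cols) = _
  simp only [← hl, ← hn, hcols, hnb]

-- A's column j = B's column j plus at most one trailing None
theorem pv_col_split (l : List Char) (k' j : ℕ) (hk' : 0 < k') (hj : j < min k' l.length) :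
    (List.range ((l.length + k' - 1)/k')).map (fun t => (l[k'*t + j]?).map (fun c => String.mk [c]))
      = (List.range ((l.length - j + k' - 1)/k')).map (fun t => (l[j + k'*t]?).map (fun c => String.mk [c]))
        ++ (if (l.length - j + k' - 1)/k' < (l.length + k' - 1)/k' then [none] else []) := by
  set n := l.length with hn
  set m := (n + k' - 1)/k' with hm
  set c := (n - j + k' - 1)/k' with hc
  have hjk : j < k' := by omega
  have hjn : j < n := by omega
  have hcm : c ≤ m := by rw [hm, hc]; exact Nat.div_le_div_right (by omega)
  have hkc : n - j ≤ k'*c := by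
    have h := pv_ceil_lt_iff (n - j) k' c hk'
    rw [← hc] at h
    omega
  have hmc1 : m ≤ c + 1 := by
    by_contra h
    push_neg at h
    have h2 : c + 2 ≤ (n + k' - 1)/k' := by omega
    have h3 := (Nat.le_div_iff_mul_le hk').mp h2
    have h4 : (c+2)*k' = k'*c + 2*k' := by ring
    omega
  rw [show m = c + (m - c) by omega, List.range_add, List.map_append]
  congr 1
  · exact List.map_congr_left (fun t _ => by rw [Nat.add_comm (k'*t) j])
  · rw [List.map_map]
    by_cases hlt : c < m
    · rw [if_pos (by omega : c < c + (m - c)), show m - c = 1 by omega]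
      simp only [List.range_one, List.map_cons, List.map_nil, Function.comp, Nat.add_zero]
      have hidx : l.length ≤ k'*c + j := by omega
      rw [List.getElem?_eq_none hidx]
      rfl
    · rw [if_neg (by omega : ¬ c < c + (m - c)), show m - c = 0 by omega]
      simp

-- B's columns contain no None
theorem pv_no_none (l : List Char) (k' j : ℕ) (hk' : 0 < k') (hj : j < min k' l.length) :
    (none : Option String) ∉ (List.range ((l.length - j + k' - 1)/k')).map
      (fun t => (l[j + k'*t]?).map (fun c => String.mk [c])) := by
  intro hmem
  rcases List.mem_map.1 hmem with ⟨t, ht, hEq⟩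
  have ht' : k'*t < l.length - j := (pv_ceil_lt_iff _ k' t hk').mp (List.mem_range.1 ht)
  have hidx : j + k'*t < l.length := by omega
  rw [List.getElem?_eq_getElem hidx] at hEq
  simp at hEq

theorem pv_pos (s : String) (k' : ℕ) (fill : Bool) (hk' : 0 < k') :
    columnify s (k':Int) fill = columnify_alt s (k':Int) fill := by
  rw [pv_A_normal s k' fill hk', pv_B_normal s k' fill hk']
  set l := s.toList with hl
  set n := l.length with hn
  set m := (n + k' - 1)/k' with hm
  rcases Nat.eq_zero_or_pos n with h0 | hpos
  · simp [h0]
  · have hM : 0 < min k' n := by omega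
    have hne : ((List.range (min k' n)).map (fun j =>
        (List.range ((n - j + k' - 1)/k')).map (fun t =>
          (l[j + k'*t]?).map (fun c => String.mk [c])))).isEmpty = false := by
      simp [List.isEmpty_iff, List.range_eq_nil]
      omega
    cases fill
    · -- fill = false
      simp only [Bool.false_and, if_neg Bool.false_ne_true, Bool.false_eq_true, if_false,
        List.map_map]
      apply List.map_congr_left
      intro j hj
      have hj' : j < min k' n := List.mem_range.1 hj
      simp only [Function.comp]
      rw [pv_col_split l k' j hk' hj']
      have hnn := pv_no_none l k' j hk' hj'
      by_cases hlt : (n - j + k' - 1)/k' < m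
      · rw [if_pos hlt, if_pos (by simp), pv_remove_last_none _ hnn]
        rfl
      · rw [if_neg hlt, List.append_nil, if_neg hnn]
    · -- fill = true
      simp only [hne, Bool.true_and, Bool.not_false, if_pos rfl, List.map_map]
      apply List.map_congr_left
      intro j hj
      have hj' : j < min k' n := List.mem_range.1 hj
      simp only [Function.comp, List.length_map, List.length_range]
      rw [pv_col_split l k' j hk' hj']
      by_cases hlt : (n - j + k' - 1)/k' < m
      · rw [if_pos hlt, if_pos (by exact_mod_cast hlt)]
      · rw [if_neg hlt, List.append_nil, if_neg (by exact_mod_cast hlt)]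

theorem pv_pyRange_neg (b k : Int) (hb : 0 ≤ b) (hk : k < 0) : PySem.List.pyRange 0 b k = [] := by
  simp only [PySem.List.pyRange]
  rw [if_neg (by omega : ¬ k = 0)]
  rw [if_neg (by omega : ¬ (0:Int) < k), if_neg (by omega : ¬ b < 0)]
  simp

theorem pv_neg (s : String) (k : Int) (fill : Bool) (hneg : k < 0) :
    columnify s k fill = columnify_alt s k fill := by
  have hA : PySem.List.pyRange 0 ((s.length : ℕ) : Int) k = [] :=
    pv_pyRange_neg _ _ (by positivity) hneg
  have hmin : min k ((s.length : ℕ) : Int) = k :=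
    min_eq_left (by have := Int.natCast_nonneg s.length; omega)
  have hB : PySem.List.pyRange 0 (min k ((s.length : ℕ) : Int)) 1 = [] := by
    rw [hmin]; exact PySem.List.pyRange_one_eq_nil (by omega)
  simp [columnify, columnify_alt, pvBlockify, PySem.Str.len, hA, hB]

theorem pv_main (s : String) (k : Int) (fill : Bool) (hk : k ≠ 0) :
    columnify s k fill = columnify_alt s k fill := by
  rcases lt_or_gt_of_ne hk with hneg | hpos
  · exact pv_neg s k fill hneg
  · obtain ⟨k', rfl⟩ : ∃ k' : ℕ, k = ((k':ℕ):Int) := ⟨k.toNat, by omega⟩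
    exact pv_pos s k' fill (by exact_mod_cast hpos)

-- ===== VERDICT (by name: the statement is the Claim_ definition above) =====
theorem columnify_spec : Claim_equal_columnify := by
  intro s k fill _ hp
  exact pv_main s k fill hp

theorem columnify_raises : Claim_raises_columnify := by
  unfold Claim_raises_columnify
  exact ⟨by intro s k f _ h hp; exact hp h, by decide⟩

-- witness self-check: the crash-fix value at the witness, projected from columnify_raises
theorem pvRaiseWitness_ok : columnify_alt pvRaiseWitness_columnify.1 pvRaiseWitness_columnify.2.1 pvRaiseWitness_columnify.2.2 = pvRaiseWitnessOut_columnify :=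
  columnify_raises.2.2.2
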